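-- pv_equiv track=rewrite | github.com/pseminatore/nbaGA | nba_genetic_algorithm.py | build_starting_five
-- ===== SOURCE A (Python) =====
-- def build_starting_five(team):
--     positions = ['C', 'PF', 'SF', 'SG', 'PG']
--     for position in positions:
--         for player in team:
--             if player[2] == position:
--                 team.insert(0, team.pop(team.index(player)))
--                 break
--     return team
-- ===== SOURCE B (Python) =====
-- def build_starting_five(team):
--     POSITIONS = ['PG', 'SG', 'SF', 'PF', 'C']
--     first = {}   # position -> first player seen with that position
--     bench = []
--     for player in team:
--         pos = player[2]
--         if pos in POSITIONS and pos not in first: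
--             first[pos] = player
--         else:
--             bench.append(player)
--     team[:] = [first[pos] for pos in POSITIONS if pos in first] + bench
--     return team
-- ===== Notes on version B (the rewrite author's own statement) =====
-- stated objective: alternative
-- what changed: Replaces A's five front-to-back scans with index/pop/insert list surgery by a single pass that records the first player per position in a dict and partitions the rest onto the bench, then concatenates starters (PG..C) with the bench.
import Mathlib
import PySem

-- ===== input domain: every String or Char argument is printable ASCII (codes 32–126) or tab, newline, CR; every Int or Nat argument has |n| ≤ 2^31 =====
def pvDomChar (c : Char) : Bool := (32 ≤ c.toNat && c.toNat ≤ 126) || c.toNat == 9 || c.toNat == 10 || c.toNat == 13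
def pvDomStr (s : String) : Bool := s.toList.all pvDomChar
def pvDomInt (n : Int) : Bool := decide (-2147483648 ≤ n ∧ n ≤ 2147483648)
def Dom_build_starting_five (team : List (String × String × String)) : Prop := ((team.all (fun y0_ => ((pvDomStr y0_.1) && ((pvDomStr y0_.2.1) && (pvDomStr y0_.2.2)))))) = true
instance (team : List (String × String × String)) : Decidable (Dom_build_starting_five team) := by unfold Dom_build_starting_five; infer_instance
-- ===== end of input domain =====

-- B replaces A's five scans with one partitioning pass over the team (return value
-- equivalence; both Pythons also mutate `team` in place to the same final list).


-- ===== PORT A =====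
-- inner `for player in team: if player[2] == position: … ; break` = find first match,
-- then team.insert(0, team.pop(team.index(player)))
def stepA (team : List (String × String × String)) (position : String) : List (String × String × String) :=
  match team.find? (fun player => player.2.2 == position) with
  | none => team
  | some player =>
    match PySem.List.index? team player with
    | none => team          -- unreachable: player ∈ team
    | some i =>
      match PySem.List.pop? team (i : Int) with
      | none => team        -- unreachable: i in range
      | some r => r.1 :: r.2

def build_starting_five (team : List (String × String × String)) : List (String × String × String) :=
  ["C", "PF", "SF", "SG", "PG"].foldl stepA team

-- ===== PORT B =====
def posListB : List String := ["PG", "SG", "SF", "PF", "C"]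

def stepB (st : PySem.Dict String (String × String × String) × List (String × String × String))
    (player : String × String × String) :
    PySem.Dict String (String × String × String) × List (String × String × String) :=
  let pos := player.2.2
  if posListB.contains pos && !(st.1.contains pos) then (st.1.insert pos player, st.2)
  else (st.1, st.2 ++ [player])

def build_starting_five_alt (team : List (String × String × String)) : List (String × String × String) :=
  let st := team.foldl stepB (PySem.Dict.empty, [])
  (posListB.filterMap (fun pos => st.1.get? pos)) ++ st.2

-- ===== PRECONDITION & SPEC =====
def Spec_build_starting_five (team : List (String × String × String)) (out : List (String × String × String)) : Prop := out = build_starting_five_alt team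
instance (team : List (String × String × String)) (out : List (String × String × String)) : Decidable (Spec_build_starting_five team out) := by unfold Spec_build_starting_five; infer_instance

-- ===== CLAIM (what is proved, stated in full; the proofs are below) =====
def Claim_equal_build_starting_five : Prop := ∀ (team : List (String × String × String)), Dom_build_starting_five team → Spec_build_starting_five team (build_starting_five team)

-- ===== LEMMAS AND PROOFS =====
abbrev Plyr : Type := String × String × String

def movePos (p : String) (t : List Plyr) : List Plyr :=
  match t.find? (fun x => x.2.2 == p) with
  | none => t
  | some y => y :: t.eraseP (fun x => x.2.2 == p)

def updF (f : String → Bool) (p : String) : String → Bool := fun q => if q = p then false else f q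

def removeF (f : String → Bool) : List Plyr → List Plyr
  | [] => []
  | h :: ts => if f h.2.2 then removeF (updF f h.2.2) ts else h :: removeF f ts

theorem removeF_congr {f g : String → Bool} (hfg : ∀ q, f q = g q) :
    ∀ (t : List Plyr), removeF f t = removeF g t := by
  intro t
  induction t generalizing f g with
  | nil => rfl
  | cons h ts ih =>
    simp only [removeF, hfg h.2.2]
    split
    · exact ih (fun q => by simp only [updF, hfg q])
    · rw [ih hfg]

theorem removeF_false {f : String → Bool} (hf : ∀ q, f q = false) :
    ∀ (t : List Plyr), removeF f t = t := by
  intro t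
  induction t generalizing f with
  | nil => rfl
  | cons h ts ih => simp only [removeF, hf h.2.2, Bool.false_eq_true, if_false, ih hf]

theorem removeF_erase : ∀ (t : List Plyr) (f : String → Bool) (p : String), f p = true →
    removeF f t = removeF (updF f p) (t.eraseP (fun x => x.2.2 == p)) := by
  intro t
  induction t with
  | nil => intro f p _; rfl
  | cons h ts ih =>
    intro f p hfp
    by_cases hp : h.2.2 = p
    · rw [List.eraseP_cons_of_pos (by simp [hp])]
      subst hp
      simp only [removeF, hfp, if_true]
    · rw [List.eraseP_cons_of_neg (by simp [hp])]
      by_cases hfh : f h.2.2 = true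
      · have h1 : (updF f p) h.2.2 = true := by simp [updF, hp, hfh]
        simp only [removeF, hfh, h1, if_true]
        rw [ih (updF f h.2.2) p (by simp only [updF, if_neg (Ne.symm hp)]; exact hfp)]
        · exact removeF_congr (fun q => by
            simp only [updF]
            by_cases h2 : q = p <;> by_cases h3 : q = h.2.2 <;> simp [h2, h3]) _
      · have h1 : (updF f p) h.2.2 = false := by simp [updF, hp]; simpa using hfh
        simp only [removeF, hfh, h1, Bool.false_eq_true, if_false]
        rw [ih f p hfp]

theorem foldl_eraseP_eq_removeF : ∀ (ps : List String), ps.Nodup → ∀ (t : List Plyr),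
    ps.foldl (fun l q => l.eraseP (fun x => x.2.2 == q)) t = removeF (fun q => ps.contains q) t := by
  intro ps
  induction ps with
  | nil => intro _ t; exact (removeF_false (fun q => rfl) t).symm
  | cons p ps ih =>
    intro hnd t
    have hmem : p ∉ ps := (List.nodup_cons.mp hnd).1
    rw [List.foldl_cons, ih (List.nodup_cons.mp hnd).2]
    rw [removeF_erase t (fun q => (p :: ps).contains q) p (by simp)]
    exact (removeF_congr (fun q => by
      simp only [updF]
      by_cases hq : q = p
      · simp [hq, List.contains_eq_mem, hmem]
      · simp [hq]) _).symm

theorem stepA_eq : ∀ (t : List Plyr) (p : String), stepA t p = movePos p t := by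
  intro t p
  induction t with
  | nil => rfl
  | cons h ts ih =>
    by_cases hb : (h.2.2 == p) = true
    · have h0 : List.idxOf? h (h :: ts) = some 0 := by
        rw [← PySem.List.index?_eq_idxOf?]; exact PySem.List.index?_cons_self h ts
      unfold stepA movePos
      rw [show List.find? (fun x : Plyr => x.2.2 == p) (h :: ts) = some h from List.find?_cons_of_pos hb,
        show List.eraseP (fun x : Plyr => x.2.2 == p) (h :: ts) = ts from List.eraseP_cons_of_pos hb]
      simp [h0, PySem.List.pop?_zero_cons]
    · have hfc : (h :: ts).find? (fun x => x.2.2 == p) = ts.find? (fun x => x.2.2 == p) :=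
        List.find?_cons_of_neg hb
      cases hfind : ts.find? (fun x => x.2.2 == p) with
      | none =>
        unfold stepA movePos
        rw [hfc, hfind]
      | some y =>
        have hy : (y.2.2 == p) = true :=
          List.find?_some (p := fun x : Plyr => x.2.2 == p) hfind
        have hne : h ≠ y := by intro he; rw [he] at hb; exact hb hy
        have hmem : y ∈ ts := List.mem_of_find?_eq_some hfind
        obtain ⟨k, hk⟩ := Option.isSome_iff_exists.mp ((PySem.List.index?_isSome_iff ts y).mpr hmem)
        obtain ⟨hklt, hget, -⟩ := PySem.List.getElem_of_index?_eq_some hk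
        have hk' : List.idxOf? y ts = some k := by
          rw [← PySem.List.index?_eq_idxOf?]; exact hk
        -- compute stepA on ts to use ih
        have hts : stepA ts p = ts[k] :: ts.eraseIdx k := by
          unfold stepA
          rw [hfind]
          simp [hk', PySem.List.pop?_natCast ts k hklt]
        rw [ih] at hts
        unfold movePos at hts
        rw [hfind] at hts
        have hyk : ts[k] = y := (List.cons_eq_cons.mp hts).1.symm
        have herase : ts.eraseIdx k = ts.eraseP (fun x => x.2.2 == p) :=
          (List.cons_eq_cons.mp hts).2.symm
        have hidx : List.idxOf? y (h :: ts) = some (k + 1) := by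
          rw [← PySem.List.index?_eq_idxOf?, PySem.List.index?_cons_of_ne ts hne, hk]; rfl
        have hpop : PySem.List.pop? (h :: ts) (((k + 1 : Nat) : Int))
            = some ((h :: ts)[k + 1]'(by simpa using Nat.succ_lt_succ hklt), (h :: ts).eraseIdx (k + 1)) :=
          PySem.List.pop?_natCast (h :: ts) (k + 1) (by simpa using Nat.succ_lt_succ hklt)
        have hpop' : PySem.List.pop? (h :: ts) ((k : Int) + 1)
            = some (ts[k], h :: ts.eraseIdx k) := by
          rw [show ((k : Int) + 1) = (((k + 1 : Nat)) : Int) by push_cast; ring, hpop]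
          simp
        unfold stepA movePos
        rw [hfc, hfind]
        simp [hidx, hpop', hyk, herase, hb]

theorem find?_eraseP_ne (p q : String) (hne : p ≠ q) : ∀ (t : List Plyr),
    (t.eraseP (fun x => x.2.2 == q)).find? (fun x => x.2.2 == p) = t.find? (fun x => x.2.2 == p) := by
  intro t
  induction t with
  | nil => rfl
  | cons h ts ih =>
    by_cases hq : (h.2.2 == q) = true
    · have hnp : ¬ (h.2.2 == p) = true := by
        simp only [beq_iff_eq] at hq ⊢; rw [hq]; exact fun he => hne he.symm
      rw [show List.eraseP (fun x : Plyr => x.2.2 == q) (h :: ts) = ts from List.eraseP_cons_of_pos hq,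
        show List.find? (fun x : Plyr => x.2.2 == p) (h :: ts)
          = List.find? (fun x : Plyr => x.2.2 == p) ts from List.find?_cons_of_neg hnp]
    · rw [show List.eraseP (fun x : Plyr => x.2.2 == q) (h :: ts)
          = h :: List.eraseP (fun x : Plyr => x.2.2 == q) ts from List.eraseP_cons_of_neg hq]
      by_cases hp : (h.2.2 == p) = true
      · rw [show List.find? (fun x : Plyr => x.2.2 == p)
            (h :: List.eraseP (fun x : Plyr => x.2.2 == q) ts) = some h from List.find?_cons_of_pos hp,
          show List.find? (fun x : Plyr => x.2.2 == p) (h :: ts) = some h from List.find?_cons_of_pos hp]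
      · rw [show List.find? (fun x : Plyr => x.2.2 == p)
            (h :: List.eraseP (fun x : Plyr => x.2.2 == q) ts)
            = List.find? (fun x : Plyr => x.2.2 == p) (List.eraseP (fun x : Plyr => x.2.2 == q) ts)
            from List.find?_cons_of_neg hp,
          show List.find? (fun x : Plyr => x.2.2 == p) (h :: ts)
            = List.find? (fun x : Plyr => x.2.2 == p) ts from List.find?_cons_of_neg hp, ih]

theorem foldA : ∀ (ps : List String), ps.Nodup → ∀ (acc rest : List Plyr),
    (∀ x ∈ acc, x.2.2 ∉ ps) →
    ps.foldl (fun t q => movePos q t) (acc ++ rest)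
      = ps.reverse.filterMap (fun q => rest.find? (fun x => x.2.2 == q)) ++ acc
        ++ ps.foldl (fun l q => l.eraseP (fun x => x.2.2 == q)) rest := by
  intro ps
  induction ps with
  | nil => intro _ acc rest _; simp
  | cons p ps ih =>
    intro hnd acc rest hacc
    have hpps : p ∉ ps := (List.nodup_cons.mp hnd).1
    have haccnone : acc.find? (fun x => x.2.2 == p) = none :=
      List.find?_eq_none.mpr (fun x hx => by
        simp only [beq_iff_eq]
        exact fun he => hacc x hx (he ▸ List.mem_cons_self ..))
    rw [List.foldl_cons]
    cases hfind : rest.find? (fun x => x.2.2 == p) with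
    | none =>
      have hmv : movePos p (acc ++ rest) = acc ++ rest := by
        unfold movePos
        rw [List.find?_append, haccnone, Option.none_or, hfind]
      have her : rest.eraseP (fun x => x.2.2 == p) = rest :=
        List.eraseP_of_forall_not (by simpa using List.find?_eq_none.mp hfind)
      rw [hmv, ih (List.nodup_cons.mp hnd).2 acc rest
        (fun x hx => fun hm => hacc x hx (List.mem_cons_of_mem _ hm))]
      simp [hfind, her]
    | some y =>
      have hy : (y.2.2 == p) = true :=
        List.find?_some (p := fun x : Plyr => x.2.2 == p) hfind
      have hmv : movePos p (acc ++ rest)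
          = y :: (acc ++ rest.eraseP (fun x => x.2.2 == p)) := by
        unfold movePos
        rw [List.find?_append, haccnone, Option.none_or, hfind,
          List.eraseP_append_right _ (fun b hb => by
            simp only [beq_iff_eq]
            exact fun he => hacc b hb (he ▸ List.mem_cons_self ..))]
      rw [hmv]
      have hih := ih (List.nodup_cons.mp hnd).2 (y :: acc) (rest.eraseP (fun x => x.2.2 == p))
        (by
          intro x hx
          rcases List.mem_cons.mp hx with he | hm
          · subst he
            rw [beq_iff_eq] at hy
            rw [hy]; exact hpps
          · exact fun hm2 => hacc x hm (List.mem_cons_of_mem _ hm2))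
      have : (y :: acc) ++ rest.eraseP (fun x => x.2.2 == p)
          = y :: (acc ++ rest.eraseP (fun x => x.2.2 == p)) := rfl
      rw [this] at hih
      rw [hih]
      have hfm : ps.reverse.filterMap
            (fun q => (rest.eraseP (fun x => x.2.2 == p)).find? (fun x => x.2.2 == q))
          = ps.reverse.filterMap (fun q => rest.find? (fun x => x.2.2 == q)) :=
        List.filterMap_congr (fun q hq =>
          find?_eraseP_ne q p (fun he => hpps (he ▸ List.mem_reverse.mp hq)) rest)
      rw [hfm]
      simp [hfind]

theorem foldB_bench : ∀ (t : List Plyr) (d : PySem.Dict String Plyr) (b : List Plyr),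
    (t.foldl stepB (d, b)).2 = b ++ removeF (fun q => posListB.contains q && !(d.contains q)) t := by
  intro t
  induction t with
  | nil => intro d b; simp [removeF]
  | cons h ts ih =>
    intro d b
    rw [List.foldl_cons]
    by_cases hc : (posListB.contains h.2.2 && !(d.contains h.2.2)) = true
    · have hstep : stepB (d, b) h = (d.insert h.2.2 h, b) := by
        simp only [stepB, hc, if_true]
      rw [hstep, ih]
      simp only [removeF, hc, if_true]
      congr 1
      apply removeF_congr
      intro q
      by_cases hq : q = h.2.2
      · simp [updF, hq, PySem.Dict.contains_insert_self]
      · simp only [updF, if_neg hq, PySem.Dict.contains_insert]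
        have : (q == h.2.2) = false := beq_eq_false_iff_ne.mpr hq
        rw [this, Bool.false_or]
    · have hstep : stepB (d, b) h = (d, b ++ [h]) := by
        simp only [stepB]
        rw [if_neg hc]
      rw [hstep, ih]
      simp only [removeF, hc, Bool.false_eq_true, if_false]
      simp

theorem foldB_dict : ∀ (t : List Plyr) (d : PySem.Dict String Plyr) (b : List Plyr) (p : String),
    posListB.contains p = true →
    ((t.foldl stepB (d, b)).1).get? p = (d.get? p).or (t.find? (fun x => x.2.2 == p)) := by
  intro t
  induction t with
  | nil => intro d b p _; simp
  | cons h ts ih =>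
    intro d b p hp
    rw [List.foldl_cons]
    by_cases hc : (posListB.contains h.2.2 && !(d.contains h.2.2)) = true
    · have hstep : stepB (d, b) h = (d.insert h.2.2 h, b) := by
        simp only [stepB, hc, if_true]
      rw [hstep, ih _ _ p hp, PySem.Dict.get?_insert]
      by_cases hq : p = h.2.2
      · subst hq
        have hcc := hc
        simp only [Bool.and_eq_true, Bool.not_eq_true'] at hcc
        have hdnone : d.get? h.2.2 = none := by
          have h2 := hcc.2
          rw [PySem.Dict.contains_eq_isSome_get?] at h2
          cases hdo : d.get? h.2.2 with
          | none => rfl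
          | some v => rw [hdo] at h2; simp at h2
        rw [if_pos rfl, hdnone, Option.none_or, Option.some_or,
          show List.find? (fun x : Plyr => x.2.2 == h.2.2) (h :: ts) = some h
            from List.find?_cons_of_pos (by simp)]
      · rw [if_neg hq, show List.find? (fun x : Plyr => x.2.2 == p) (h :: ts)
            = List.find? (fun x : Plyr => x.2.2 == p) ts
            from List.find?_cons_of_neg (by simp only [beq_iff_eq]; exact fun he => hq he.symm)]
    · have hstep : stepB (d, b) h = (d, b ++ [h]) := by
        simp only [stepB]
        rw [if_neg hc]
      rw [hstep, ih _ _ p hp]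
      by_cases hq : p = h.2.2
      · subst hq
        have hdc : d.contains h.2.2 = true := by
          have hc2 := hc
          simp only [Bool.and_eq_true, Bool.not_eq_true', not_and] at hc2
          have := hc2 hp
          simpa using this
        rw [PySem.Dict.contains_eq_isSome_get?] at hdc
        obtain ⟨v, hv⟩ := Option.isSome_iff_exists.mp hdc
        rw [hv]; rfl
      · rw [show List.find? (fun x : Plyr => x.2.2 == p) (h :: ts)
            = List.find? (fun x : Plyr => x.2.2 == p) ts
            from List.find?_cons_of_neg (by simp only [beq_iff_eq]; exact fun he => hq he.symm)]

theorem altB_eq : ∀ (t : List Plyr), build_starting_five_alt t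
    = posListB.filterMap (fun q => t.find? (fun x => x.2.2 == q))
      ++ removeF (fun q => posListB.contains q) t := by
  intro t
  show (posListB.filterMap fun pos => ((t.foldl stepB (PySem.Dict.empty, [])).1.get? pos))
      ++ (t.foldl stepB (PySem.Dict.empty, [])).2 = _
  rw [foldB_bench]
  congr 1
  · apply List.filterMap_congr
    intro p hp
    rw [foldB_dict t _ _ p (by simpa [List.contains_eq_mem] using hp)]
    simp
  · rw [List.nil_append]
    apply removeF_congr
    intro q
    simp [PySem.Dict.contains_empty]

theorem A_eq : ∀ (t : List Plyr), build_starting_five t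
    = posListB.filterMap (fun q => t.find? (fun x => x.2.2 == q))
      ++ removeF (fun q => posListB.contains q) t := by
  intro t
  have hs : stepA = fun t q => movePos q t := funext fun t => funext fun q => stepA_eq t q
  unfold build_starting_five
  rw [hs]
  have hfa := foldA ["C", "PF", "SF", "SG", "PG"] (by decide) [] t (by simp)
  rw [List.nil_append, List.append_nil] at hfa
  rw [hfa]
  congr 1
  · rw [foldl_eraseP_eq_removeF _ (by decide)]
    apply removeF_congr
    intro q
    rw [Bool.eq_iff_iff]
    simp [posListB, List.contains_eq_mem]
    tauto

-- ===== VERDICT (by name: the statement is the Claim_ definition above) =====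
theorem build_starting_five_spec : Claim_equal_build_starting_five := by
  intro team _
  unfold Spec_build_starting_five
  rw [A_eq, altB_eq]
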